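-- pv_equiv track=rewrite | github.com/itmo-escience/ProFIT | profit/util_pm.py | incidence_matrix
-- ===== SOURCE A (Python) =====
-- def incidence_matrix(edges, excpt=[]):
--     """Return an incidence matrix as dict where 1 indicates
--     a relationship between two nodes in a directed graph.
--
--     Parameters
--     ----------
--     edges: list
--         Set of graph's edges
--     excpt: list
--         Set of nodes to exclude from matrix construction
--         (default [])
--     """
--     I = dict()
--     for e in edges:
--         a_i = e[0]
--         a_j = e[1]
--         if (a_i in excpt) | (a_j in excpt):
--             continue
--         if a_i not in I:
--             I[a_i] = dict()
--         if a_j not in I[a_i]: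
--             I[a_i][a_j] = 1
--     return I
-- ===== SOURCE B (Python) =====
-- def incidence_matrix(edges, excpt=[]):
--     """Return an incidence matrix as dict where 1 indicates
--     a relationship between two nodes in a directed graph.
--     Filter-then-group: keep the valid edges, list the distinct
--     source nodes in first-appearance order, then build each row
--     by rescanning the valid edges for that source."""
--     valid = [e for e in edges if e[0] not in excpt and e[1] not in excpt]
--     sources = dict.fromkeys(e[0] for e in valid)
--     return {s: {e[1]: 1 for e in valid if e[0] == s} for s in sources}
-- ===== Notes on version B (the rewrite author's own statement) =====
-- stated objective: alternative
-- what changed: A builds the nested dict in one incremental pass with conditional inserts; B first filters the valid edges, collects distinct sources in order, then builds each row by rescanning the valid edges per source (filter-then-group-by-rescan).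
import Mathlib
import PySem

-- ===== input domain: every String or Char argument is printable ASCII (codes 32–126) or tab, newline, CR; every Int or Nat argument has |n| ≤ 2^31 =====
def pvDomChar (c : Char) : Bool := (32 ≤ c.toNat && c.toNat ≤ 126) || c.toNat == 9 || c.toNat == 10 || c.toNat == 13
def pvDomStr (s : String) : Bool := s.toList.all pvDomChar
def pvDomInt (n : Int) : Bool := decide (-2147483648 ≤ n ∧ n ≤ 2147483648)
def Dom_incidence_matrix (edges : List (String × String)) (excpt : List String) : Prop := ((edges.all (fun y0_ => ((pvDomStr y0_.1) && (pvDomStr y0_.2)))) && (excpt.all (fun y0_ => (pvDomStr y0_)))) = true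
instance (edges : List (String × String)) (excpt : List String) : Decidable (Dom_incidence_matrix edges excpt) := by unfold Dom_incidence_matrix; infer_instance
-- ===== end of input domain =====

-- B replaces A's one-pass incremental nested-dict build by filter-then-group: filter the
-- valid edges once, list distinct sources in order, and build each row by rescanning the
-- valid edges for that source (alternative decomposition, similar cost).


-- ===== PORT A =====
def incidence_matrix (edges : List (String × String)) (excpt : List String) : List (String × List (String × Int)) :=
  let I : PySem.Dict String (PySem.Dict String Int) :=
    edges.foldl (fun I e =>
      let a_i := e.1
      let a_j := e.2
      if excpt.contains a_i || excpt.contains a_j then I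
      else
        let I' := if !(I.contains a_i) then I.insert a_i PySem.Dict.empty else I
        if !((I'.getD a_i PySem.Dict.empty).contains a_j) then
          I'.insert a_i ((I'.getD a_i PySem.Dict.empty).insert a_j 1)
        else I') PySem.Dict.empty
  I.items.map (fun p => (p.1, p.2.items))

-- ===== PORT B =====
def incidence_matrix_alt (edges : List (String × String)) (excpt : List String) : List (String × List (String × Int)) :=
  let valid := edges.filter (fun e => !(excpt.contains e.1) && !(excpt.contains e.2))
  let sources := PySem.List.dedup (valid.map (fun e => e.1))
  let out : PySem.Dict String (List (String × Int)) :=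
    sources.foldl (fun d s =>
      d.insert s (PySem.Dict.ofList ((valid.filter (fun e => e.1 == s)).map (fun e => (e.2, (1 : Int))))).items)
      PySem.Dict.empty
  out.items

-- ===== PRECONDITION & SPEC =====
def Spec_incidence_matrix (edges : List (String × String)) (excpt : List String) (out : List (String × List (String × Int))) : Prop := out = incidence_matrix_alt edges excpt
instance (edges : List (String × String)) (excpt : List String) (out : List (String × List (String × Int))) : Decidable (Spec_incidence_matrix edges excpt out) := by unfold Spec_incidence_matrix; infer_instance

-- ===== CLAIM (what is proved, stated in full; the proofs are below) =====
def Claim_equal_incidence_matrix : Prop := ∀ (edges : List (String × String)) (excpt : List String), Dom_incidence_matrix edges excpt → Spec_incidence_matrix edges excpt (incidence_matrix edges excpt)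

-- ===== LEMMAS AND PROOFS =====

-- inserting a key with the exact value it already has leaves the dict unchanged
theorem insert_eq_self_of_get {ν : Type} (d : PySem.Dict String ν) (k : String) (v : ν)
    (hnd : d.keys.Nodup) (hg : d.get? k = some v) : d.insert k v = d := by
  apply PySem.Dict.ext
  rw [PySem.Dict.items_insert_of_contains d v
      (by rw [PySem.Dict.contains_eq_isSome_get?, hg]; rfl)]
  conv_rhs => rw [← List.map_id d.items]
  apply List.map_congr_left
  intro p hp
  obtain ⟨pk, pv⟩ := p
  by_cases hpk : pk == k
  · have hk : pk = k := by simpa using hpk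
    subst hk
    have hpv : d.get? pk = some pv := PySem.Dict.get?_of_mem_items d hp hnd
    rw [hg] at hpv
    obtain rfl : v = pv := Option.some_inj.mp hpv
    simp
  · simp [hpk]

-- A's loop body equals the uniform 'modify' step under the all-values-are-1 invariant
def stepM (I : PySem.Dict String (PySem.Dict String Int)) (e : String × String) :
    PySem.Dict String (PySem.Dict String Int) :=
  I.modify e.1 PySem.Dict.empty (fun dd => dd.insert e.2 1)

def InvOnes (I : PySem.Dict String (PySem.Dict String Int)) : Prop :=
  I.keys.Nodup ∧ ∀ d ∈ I.values, d.keys.Nodup ∧ ∀ v ∈ d.values, v = 1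

theorem stepA_eq_stepM (I : PySem.Dict String (PySem.Dict String Int)) (e : String × String)
    (h : InvOnes I) :
    (let I' := if !(I.contains e.1) then I.insert e.1 PySem.Dict.empty else I
     if !((I'.getD e.1 PySem.Dict.empty).contains e.2) then
       I'.insert e.1 ((I'.getD e.1 PySem.Dict.empty).insert e.2 1)
     else I') = stepM I e := by
  obtain ⟨hnd, hvals⟩ := h
  by_cases hc : I.contains e.1
  · simp only [hc, Bool.not_true, Bool.false_eq_true, if_false, stepM, PySem.Dict.modify]
    have hsome : (I.get? e.1).isSome = true := by
      rw [PySem.Dict.contains_eq_isSome_get?] at hc; exact hc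
    obtain ⟨d, hd⟩ := Option.isSome_iff_exists.mp hsome
    have hgetD : I.getD e.1 PySem.Dict.empty = d :=
      PySem.Dict.getD_of_get?_eq_some I PySem.Dict.empty hd
    rw [hgetD]
    by_cases hc2 : d.contains e.2
    · simp only [hc2, Bool.not_true, Bool.false_eq_true, if_false]
      have hsome2 : (d.get? e.2).isSome = true := by
        rw [PySem.Dict.contains_eq_isSome_get?] at hc2; exact hc2
      obtain ⟨v, hv⟩ := Option.isSome_iff_exists.mp hsome2
      have hdmem : d ∈ I.values := by
        simp only [PySem.Dict.values]
        exact List.mem_map.mpr ⟨_, PySem.Dict.mem_items_of_get?_eq_some I hd, rfl⟩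
      obtain ⟨hdnd, hones⟩ := hvals d hdmem
      have hv1 : v = 1 := by
        apply hones
        simp only [PySem.Dict.values]
        exact List.mem_map.mpr ⟨_, PySem.Dict.mem_items_of_get?_eq_some d hv, rfl⟩
      rw [insert_eq_self_of_get d e.2 1 hdnd (by rw [hv, hv1])]
      rw [insert_eq_self_of_get I e.1 d hnd hd]
    · simp [hc2]
  · simp only [hc, Bool.not_false, if_true, stepM, PySem.Dict.modify]
    have hg : I.get? e.1 = none := by
      rcases h' : I.get? e.1 with _ | d
      · rfl
      · exact absurd (by rw [PySem.Dict.contains_eq_isSome_get?, h']; rfl) hc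
    rw [PySem.Dict.getD_insert_self]
    simp only [PySem.Dict.contains_empty, Bool.not_false, if_true]
    rw [PySem.Dict.insert_insert_self,
        PySem.Dict.getD_of_get?_eq_none I PySem.Dict.empty hg]

theorem invOnes_stepM (I : PySem.Dict String (PySem.Dict String Int)) (e : String × String)
    (h : InvOnes I) : InvOnes (stepM I e) := by
  obtain ⟨hnd, hvals⟩ := h
  constructor
  · unfold stepM
    rw [PySem.Dict.keys_modify]
    have := PySem.Dict.nodup_keys_insert I e.1
      ((I.getD e.1 PySem.Dict.empty).insert e.2 1) hnd
    simpa [PySem.Dict.keys] using this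
  · intro d hd
    unfold stepM PySem.Dict.modify at hd
    have hd0prop : (I.getD e.1 PySem.Dict.empty).keys.Nodup ∧
        ∀ v ∈ (I.getD e.1 PySem.Dict.empty).values, v = 1 := by
      rcases hg : I.get? e.1 with _ | dd
      · rw [PySem.Dict.getD_of_get?_eq_none I PySem.Dict.empty hg]
        exact ⟨PySem.Dict.nodup_keys_empty, by intro v hv; cases hv⟩
      · rw [PySem.Dict.getD_of_get?_eq_some I PySem.Dict.empty hg]
        refine hvals dd ?_
        simp only [PySem.Dict.values]
        exact List.mem_map.mpr ⟨_, PySem.Dict.mem_items_of_get?_eq_some I hg, rfl⟩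
    rcases PySem.Dict.mem_values_insert _ _ _ _ hd with h1 | h2
    · subst h1
      refine ⟨PySem.Dict.nodup_keys_insert _ _ _ hd0prop.1, ?_⟩
      intro v hv
      rcases PySem.Dict.mem_values_insert _ _ _ _ hv with h3 | h4
      · exact h3
      · exact hd0prop.2 v h4
    · exact hvals d h2

theorem foldl_stepA_eq_stepM (l : List (String × String))
    (I : PySem.Dict String (PySem.Dict String Int)) (h : InvOnes I) :
    l.foldl (fun I e =>
      let I' := if !(I.contains e.1) then I.insert e.1 PySem.Dict.empty else I
      if !((I'.getD e.1 PySem.Dict.empty).contains e.2) then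
        I'.insert e.1 ((I'.getD e.1 PySem.Dict.empty).insert e.2 1)
      else I') I = l.foldl stepM I := by
  induction l generalizing I with
  | nil => rfl
  | cons e l ih =>
    simp only [List.foldl_cons]
    rw [stepA_eq_stepM I e h]
    exact ih _ (invOnes_stepM I e h)

theorem getD_foldl_stepM (l : List (String × String))
    (I : PySem.Dict String (PySem.Dict String Int)) (c : String) :
    (l.foldl stepM I).getD c PySem.Dict.empty
      = ((l.filter (fun e => e.1 == c)).map (fun e => (e.2, (1 : Int)))).foldl
          (fun dd p => dd.insert p.1 p.2) (I.getD c PySem.Dict.empty) := by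
  induction l generalizing I with
  | nil => rfl
  | cons e l ih =>
    simp only [List.foldl_cons, List.filter_cons]
    by_cases hc : (e.1 == c) = true
    · have hce : e.1 = c := by simpa using hc
      subst hce
      simp only [hc, if_pos, List.map_cons, List.foldl_cons]
      rw [ih]
      unfold stepM
      rw [PySem.Dict.getD_modify_self]
    · simp only [Bool.not_eq_true] at hc
      simp only [hc, Bool.false_eq_true, if_false]
      rw [ih]
      unfold stepM
      rw [PySem.Dict.getD_modify_of_ne I PySem.Dict.empty (fun dd => dd.insert e.2 1)
            (fun h' => by rw [h'] at hc; simp at hc)]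

theorem stepM_def_insert : stepM = fun I e =>
    I.insert e.1 ((I.getD e.1 PySem.Dict.empty).insert e.2 1) := rfl

theorem stepM_def_modify : stepM = fun I e =>
    I.modify e.1 PySem.Dict.empty (fun dd => dd.insert e.2 1) := rfl

theorem invOnes_empty : InvOnes PySem.Dict.empty :=
  ⟨PySem.Dict.nodup_keys_empty, by intro d hd; cases hd⟩

-- ===== VERDICT (by name: the statement is the Claim_ definition above) =====
theorem incidence_matrix_spec : Claim_equal_incidence_matrix := by
  intro edges excpt _
  unfold Spec_incidence_matrix incidence_matrix incidence_matrix_alt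
  have hA :
      edges.foldl (fun I e =>
        let a_i := e.1
        let a_j := e.2
        if excpt.contains a_i || excpt.contains a_j then I
        else
          let I' := if !(I.contains a_i) then I.insert a_i PySem.Dict.empty else I
          if !((I'.getD a_i PySem.Dict.empty).contains a_j) then
            I'.insert a_i ((I'.getD a_i PySem.Dict.empty).insert a_j 1)
          else I') (PySem.Dict.empty : PySem.Dict String (PySem.Dict String Int))
      = (edges.filter (fun e => !(excpt.contains e.1) && !(excpt.contains e.2))).foldl
          stepM PySem.Dict.empty := by
    have h1 :
        edges.foldl (fun I e =>
          let a_i := e.1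
          let a_j := e.2
          if excpt.contains a_i || excpt.contains a_j then I
          else
            let I' := if !(I.contains a_i) then I.insert a_i PySem.Dict.empty else I
            if !((I'.getD a_i PySem.Dict.empty).contains a_j) then
              I'.insert a_i ((I'.getD a_i PySem.Dict.empty).insert a_j 1)
            else I') (PySem.Dict.empty : PySem.Dict String (PySem.Dict String Int))
        = edges.foldl (fun I e =>
            if !(excpt.contains e.1) && !(excpt.contains e.2) then
              (let I' := if !(I.contains e.1) then I.insert e.1 PySem.Dict.empty else I
               if !((I'.getD e.1 PySem.Dict.empty).contains e.2) then
                 I'.insert e.1 ((I'.getD e.1 PySem.Dict.empty).insert e.2 1)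
               else I')
            else I) PySem.Dict.empty := by
      apply PySem.List.foldl_congr_mem
      intro acc e _
      dsimp only
      have hp : (!(excpt.contains e.1) && !(excpt.contains e.2))
          = !(excpt.contains e.1 || excpt.contains e.2) := by
        cases hx : excpt.contains e.1 <;> cases hy : excpt.contains e.2 <;> rfl
      rw [hp]
      cases h : (excpt.contains e.1 || excpt.contains e.2) <;> rfl
    rw [h1, PySem.List.foldl_if_eq_foldl_filter,
        foldl_stepA_eq_stepM _ _ invOnes_empty]
  rw [hA]
  set valid := edges.filter (fun e => !(excpt.contains e.1) && !(excpt.contains e.2))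
    with hvalid
  have hAnd : ((valid.foldl stepM PySem.Dict.empty).keys).Nodup := by
    rw [stepM_def_insert]
    exact PySem.Dict.nodup_keys_foldl_insert_key valid (fun e => e.1)
      (fun d e => (d.getD e.1 PySem.Dict.empty).insert e.2 1) PySem.Dict.empty
      (by rw [PySem.Dict.keys_empty]; exact List.nodup_nil)
  have hAkeys : (valid.foldl stepM PySem.Dict.empty).keys
      = PySem.List.dedup (valid.map (fun e => e.1)) := by
    rw [stepM_def_modify,
        PySem.Dict.keys_foldl_modify_key valid (fun e => e.1) PySem.Dict.empty
          (fun d e => fun dd => dd.insert e.2 1) PySem.Dict.empty,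
        PySem.Dict.keys_empty, PySem.Set.update_nil_left, PySem.List.dedup_eq_ofList]
  dsimp only
  rw [PySem.Dict.items_eq_map_keys _ hAnd PySem.Dict.empty, hAkeys]
  rw [PySem.Dict.items_foldl_insert_fresh
        (l := PySem.List.dedup (valid.map (fun e => e.1)))
        (k := fun s => s)
        (v := fun s => (PySem.Dict.ofList
          ((valid.filter (fun e => e.1 == s)).map (fun e => (e.2, (1 : Int))))).items)
        (d := PySem.Dict.empty)
        (by intro a _; exact PySem.Dict.contains_empty a)
        (by simp)]
  simp only [List.map_map]
  apply List.map_congr_left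
  intro s _
  simp only [Function.comp]
  refine congrArg (fun z => (s, z)) ?_
  refine congrArg PySem.Dict.items ?_
  rw [getD_foldl_stepM, PySem.Dict.getD_empty]
  rfl
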